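-- pv_equiv track=rewrite | github.com/thejosmeister/SimsigTtTools | assorted_files/scripts/cifParser.py | times_cross_midnight
-- ===== SOURCE A (Python) =====
-- def times_cross_midnight(locations: list) -> bool:
--     flattened_times = []
--     for l in locations:
--         if 'arr' in l and l['arr'] != '':
--             flattened_times.append(int(l['arr'][0:4]))
--         if 'dep' in l and l['dep'] != '':
--             flattened_times.append(int(l['dep'][0:4]))
--
--     for i in range(len(flattened_times) - 1):
--         if flattened_times[i] > flattened_times[i + 1]:
--             return True
--
--     return False
-- ===== SOURCE B (Python) =====
-- def times_cross_midnight(locations: list) -> bool: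
--     # The sequence crosses midnight iff the extracted times are not in
--     # non-decreasing order; test that by comparing with a sorted copy.
--     times = [int(l[k][0:4]) for l in locations for k in ('arr', 'dep') if l.get(k)]
--     return times != sorted(times)
-- ===== Notes on version B (the rewrite author's own statement) =====
-- stated objective: alternative
-- what changed: B reduces the problem to a sortedness test: it extracts the times with one comprehension and returns times != sorted(times), instead of A's imperative build-then-scan of adjacent pairs with an index loop.
import Mathlib
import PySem

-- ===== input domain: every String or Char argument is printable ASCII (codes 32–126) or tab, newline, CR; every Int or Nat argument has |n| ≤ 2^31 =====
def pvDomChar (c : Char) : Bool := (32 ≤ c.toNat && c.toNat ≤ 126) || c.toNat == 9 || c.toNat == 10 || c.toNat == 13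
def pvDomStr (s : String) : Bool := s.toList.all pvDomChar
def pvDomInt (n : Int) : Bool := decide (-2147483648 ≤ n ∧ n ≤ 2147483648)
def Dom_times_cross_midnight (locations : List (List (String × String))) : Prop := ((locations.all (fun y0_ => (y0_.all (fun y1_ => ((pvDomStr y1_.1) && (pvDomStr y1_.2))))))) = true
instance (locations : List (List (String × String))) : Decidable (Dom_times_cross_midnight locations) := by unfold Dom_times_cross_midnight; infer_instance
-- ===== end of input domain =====

-- B decides "crosses midnight" as a sortedness test (times != sorted(times)) on the
-- comprehension-extracted times, instead of A's build-then-scan of adjacent pairs.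

-- ===== PORT A =====
-- dict lookup (first match, per the association-list convention): l.get(k) / 'k in l' + l[k]
def tcmField (l : List (String × String)) (k : String) : Option String :=
  (l.find? (fun p => p.1 == k)).map (·.2)

-- int(v[0:4]); Pre_ guarantees the parse succeeds, so the default 0 is never used
def tcmTime (v : String) : Int :=
  (PySem.Int.ofStr? (PySem.Str.slice v (some 0) (some 4))).getD 0

def times_cross_midnight (locations : List (List (String × String))) : Bool :=
  let flattened_times := locations.foldl (fun acc l =>
    let acc := match tcmField l "arr" with
      | some v => if v ≠ "" then acc ++ [tcmTime v] else acc
      | none => acc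
    match tcmField l "dep" with
      | some v => if v ≠ "" then acc ++ [tcmTime v] else acc
      | none => acc) []
  (PySem.List.pyRange 0 ((flattened_times.length : Int) - 1) 1).any (fun i =>
    decide (PySem.List.pyGetD flattened_times i 0 > PySem.List.pyGetD flattened_times (i + 1) 0))

-- ===== PORT B =====
def times_cross_midnight_alt (locations : List (List (String × String))) : Bool :=
  -- the comprehension: for l in locations, for k in ('arr','dep'), if l.get(k) truthy
  let times := locations.flatMap (fun l =>
    ["arr", "dep"].flatMap (fun k =>
      match tcmField l k with
      | some v => if v ≠ "" then [tcmTime v] else []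
      | none => []))
  decide (times ≠ PySem.List.sorted times (fun x => x) false)

-- ===== PRECONDITION & SPEC =====
-- Pre_ admits exactly the inputs on which A returns: every present non-empty
-- 'arr'/'dep' field must have int(field[0:4]) parse (otherwise A raises ValueError).
def pvOkField (v : String) : Bool :=
  (v == "") || (PySem.Int.ofStr? (PySem.Str.slice v (some 0) (some 4))).isSome

def Pre_times_cross_midnight (locations : List (List (String × String))) : Prop :=
  (locations.all (fun l =>
    ((l.find? (fun p => p.1 == "arr")).all (fun p => pvOkField p.2)) &&
    ((l.find? (fun p => p.1 == "dep")).all (fun p => pvOkField p.2)))) = true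

instance (locations : List (List (String × String))) : Decidable (Pre_times_cross_midnight locations) := by
  unfold Pre_times_cross_midnight; infer_instance

def pvWitness_times_cross_midnight : (List (List (String × String))) :=
  [[("arr", "1200"), ("dep", "1205")], [("dep", "2359")], [("arr", "")]]

def Spec_times_cross_midnight (locations : List (List (String × String))) (out : Bool) : Prop := out = times_cross_midnight_alt locations
instance (locations : List (List (String × String))) (out : Bool) : Decidable (Spec_times_cross_midnight locations out) := by unfold Spec_times_cross_midnight; infer_instance

-- ===== CLAIM (what is proved, stated in full; the proofs are below) =====
def Claim_equal_times_cross_midnight : Prop := ∀ (locations : List (List (String × String))), Dom_times_cross_midnight locations → Pre_times_cross_midnight locations → Spec_times_cross_midnight locations (times_cross_midnight locations)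

-- ===== LEMMAS AND PROOFS =====

-- the times contributed by one field value / one location (A's append order)
def fieldTimes (v? : Option String) : List Int :=
  match v? with
  | some v => if v ≠ "" then [tcmTime v] else []
  | none => []

def locTimes (l : List (String × String)) : List Int :=
  fieldTimes (tcmField l "arr") ++ fieldTimes (tcmField l "dep")

-- "some adjacent pair decreases"
def decRec : List Int → Bool
  | a :: b :: r => decide (a > b) || decRec (b :: r)
  | _ => false

lemma foldA_eq_flatMap (locations : List (List (String × String))) :
    ∀ acc : List Int,
      locations.foldl (fun acc l =>
        let acc := match tcmField l "arr" with
          | some v => if v ≠ "" then acc ++ [tcmTime v] else acc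
          | none => acc
        match tcmField l "dep" with
          | some v => if v ≠ "" then acc ++ [tcmTime v] else acc
          | none => acc) acc
      = acc ++ locations.flatMap locTimes := by
  induction locations with
  | nil => intro acc; simp
  | cons l ls ih =>
      intro acc
      have hstep : (let acc' := match tcmField l "arr" with
          | some v => if v ≠ "" then acc ++ [tcmTime v] else acc
          | none => acc
        match tcmField l "dep" with
          | some v => if v ≠ "" then acc' ++ [tcmTime v] else acc'
          | none => acc') = acc ++ locTimes l := by
        simp only [locTimes, fieldTimes]
        cases tcmField l "arr" <;> cases tcmField l "dep" <;> simp <;> split_ifs <;> simp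
      simp only [List.foldl_cons, List.flatMap_cons]
      rw [hstep, ih, List.append_assoc]

lemma scan_eq_decRec_nat (ts : List Int) :
    (List.range (ts.length - 1)).any
      (fun k => decide (ts.getD k 0 > ts.getD (k + 1) 0)) = decRec ts := by
  induction ts with
  | nil => simp [decRec]
  | cons a ts ih =>
      cases ts with
      | nil => simp [decRec]
      | cons b r =>
          have hlen : (a :: b :: r).length - 1 = (b :: r).length - 1 + 1 := by simp
          rw [hlen, List.range_succ_eq_map, List.any_cons, List.any_map, decRec, ← ih]
          simp only [Function.comp_def, List.getD_cons_succ, List.getD_cons_zero]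

lemma scan_eq_decRec (ts : List Int) :
    (PySem.List.pyRange 0 ((ts.length : Int) - 1) 1).any (fun i =>
      decide (PySem.List.pyGetD ts i 0 > PySem.List.pyGetD ts (i + 1) 0)) = decRec ts := by
  rw [PySem.List.pyRange_one]
  rw [List.any_map]
  have hcast : ((ts.length : Int) - 1 - 0).toNat = ts.length - 1 := by omega
  rw [hcast, ← scan_eq_decRec_nat ts]
  congr 1
  funext k
  simp only [Function.comp_apply, Function.comp, zero_add]
  have h1 : PySem.List.pyGetD ts (k : Int) 0 = ts.getD k 0 := PySem.List.pyGetD_natCast ..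
  have h2 : PySem.List.pyGetD ts ((k : Int) + 1) 0 = ts.getD (k + 1) 0 := by
    have hc : ((k : Int) + 1) = ((k + 1 : Nat) : Int) := by push_cast; ring
    rw [hc]; exact PySem.List.pyGetD_natCast ..
  rw [h1, h2]

-- B's comprehension over ('arr','dep') produces exactly A's per-location times
lemma flatB_eq_locTimes (l : List (String × String)) :
    (["arr", "dep"].flatMap (fun k =>
      match tcmField l k with
      | some v => if v ≠ "" then [tcmTime v] else []
      | none => [])) = locTimes l := by
  simp [locTimes, fieldTimes]

-- no adjacent decrease ⟺ globally non-decreasing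
lemma decRec_eq_false_iff (ts : List Int) :
    decRec ts = false ↔ ts.Pairwise (· ≤ ·) := by
  induction ts with
  | nil => simp [decRec]
  | cons a ts ih =>
      cases ts with
      | nil => simp [decRec]
      | cons b r =>
          rw [decRec, Bool.or_eq_false_iff]
          constructor
          · rintro ⟨h1, h2⟩
            have hab : a ≤ b := by
              by_contra h; exact absurd (decide_eq_true (by omega : a > b)) (by simp [h1])
            have hrest := ih.mp h2
            refine List.pairwise_cons.mpr ⟨?_, hrest⟩
            intro x hx
            rcases List.mem_cons.mp hx with rfl | hx
            · omega
            · have := (List.pairwise_cons.mp hrest).1 x hx; omega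
          · intro h
            have hab : a ≤ b := (List.pairwise_cons.mp h).1 b (by simp)
            exact ⟨by simp; omega, ih.mpr (List.pairwise_cons.mp h).2⟩

-- adjacent-pair scan ⟺ "list differs from its sorted copy"
lemma decRec_eq_ne_sorted (ts : List Int) :
    decRec ts = decide (ts ≠ PySem.List.sorted ts (fun x => x) false) := by
  by_cases h : ts.Pairwise (· ≤ ·)
  · have hs : PySem.List.sorted ts (fun x => x) false = ts :=
      PySem.List.sorted_eq_self_of_pairwise ts (fun x => x) h
    rw [(decRec_eq_false_iff ts).mpr h, hs]; simp
  · have hne : ts ≠ PySem.List.sorted ts (fun x => x) false := by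
      intro heq
      exact h (by simpa [← heq] using PySem.List.sorted_pairwise ts (fun x => x))
    have hd : decRec ts = true := by
      by_contra hc
      exact h ((decRec_eq_false_iff ts).mp (by revert hc; cases decRec ts <;> simp))
    rw [hd]; simp [hne]

-- ===== VERDICT (by name: the statement is the Claim_ definition above) =====
theorem times_cross_midnight_spec : Claim_equal_times_cross_midnight := by
  intro locations _ _
  unfold Spec_times_cross_midnight times_cross_midnight times_cross_midnight_alt
  simp only [flatB_eq_locTimes]
  rw [foldA_eq_flatMap locations [], List.nil_append, scan_eq_decRec, decRec_eq_ne_sorted]
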